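-- pv_equiv track=rewrite | github.com/Rtef119/itstep7 | generator.py | gen_step
-- ===== SOURCE A (Python) =====
-- def gen_step(chiclo):
--     i=0
--     while True:
--         result = chiclo**i
--         yield result
--         if result>100**10:
--             return
--         i+=1
-- ===== SOURCE B (Python) =====
-- def gen_step(chiclo):
--     return _gen_from(chiclo, 1)
--
--
-- def _gen_from(chiclo, r):
--     # yields r, then recursively yields the rest of the power sequence
--     yield r
--     if r <= 100**10:
--         yield from _gen_from(chiclo, r * chiclo)
-- ===== Notes on version B (the rewrite author's own statement) =====
-- stated objective: alternative
-- what changed: B is a recursive generator carrying a running product: it yields the accumulator and recurses on r*chiclo while r <= 100**10, replacing A's iterative counter-plus-exponentiation loop.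
import Mathlib
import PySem

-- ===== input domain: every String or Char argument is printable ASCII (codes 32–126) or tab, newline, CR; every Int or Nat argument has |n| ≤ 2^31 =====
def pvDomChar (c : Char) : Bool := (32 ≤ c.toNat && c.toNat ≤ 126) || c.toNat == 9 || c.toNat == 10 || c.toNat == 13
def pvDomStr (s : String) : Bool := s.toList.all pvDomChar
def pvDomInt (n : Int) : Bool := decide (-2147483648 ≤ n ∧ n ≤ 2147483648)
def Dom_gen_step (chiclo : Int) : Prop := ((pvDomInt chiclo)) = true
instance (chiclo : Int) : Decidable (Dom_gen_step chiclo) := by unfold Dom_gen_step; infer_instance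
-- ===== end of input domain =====

-- B replaces A's iterative counter-plus-exponentiation loop with a recursive generator carrying a running product (objective: alternative).

-- ===== PORT A =====
-- A's loop: result = chiclo**i; yield result; stop after yielding once result > 100**10; else i += 1.
-- fuel only makes the recursion total; for |chiclo| ≥ 2 the loop exits within 69 iterations, so fuel 100 is never hit (for |chiclo| ≤ 1 the Python generator is infinite and both fuelled ports truncate identically).
def gen_step_go (chiclo : Int) (i : Nat) : Nat → List Int
  | 0 => []
  | fuel + 1 =>
    let result := chiclo ^ i
    if result > 100 ^ 10 then [result] else result :: gen_step_go chiclo (i + 1) fuel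

def gen_step (chiclo : Int) : List Int := gen_step_go chiclo 0 100

-- ===== PORT B =====
-- B's _gen_from: yield r; if r ≤ 100**10, recurse on r*chiclo. Same fuel guard for totality.
def genFrom (chiclo r : Int) : Nat → List Int
  | 0 => []
  | fuel + 1 => r :: (if r ≤ 100 ^ 10 then genFrom chiclo (r * chiclo) fuel else [])

def gen_step_alt (chiclo : Int) : List Int := genFrom chiclo 1 100

-- ===== PRECONDITION & SPEC =====
def Spec_gen_step (chiclo : Int) (out : List Int) : Prop := out = gen_step_alt chiclo
instance (chiclo : Int) (out : List Int) : Decidable (Spec_gen_step chiclo out) := by unfold Spec_gen_step; infer_instance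

-- ===== CLAIM (what is proved, stated in full; the proofs are below) =====
def Claim_equal_gen_step : Prop := ∀ (chiclo : Int), Dom_gen_step chiclo → Spec_gen_step chiclo (gen_step chiclo)

-- ===== LEMMAS AND PROOFS =====
theorem gen_step_go_eq_genFrom (chiclo : Int) (i fuel : Nat) :
    gen_step_go chiclo i fuel = genFrom chiclo (chiclo ^ i) fuel := by
  induction fuel generalizing i with
  | zero => rfl
  | succ fuel ih =>
    simp only [gen_step_go, genFrom]
    split_ifs with h h'
    · omega
    · rfl
    · rw [ih (i + 1), ← pow_succ]
    · omega

-- ===== VERDICT (by name: the statement is the Claim_ definition above) =====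
theorem gen_step_spec : Claim_equal_gen_step := by
  intro chiclo _
  show gen_step chiclo = gen_step_alt chiclo
  have h := gen_step_go_eq_genFrom chiclo 0 100
  simpa [gen_step, gen_step_alt] using h
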